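-- pv_equiv track=rewrite | github.com/looooo/pastix | tools/wrappers/wrap_fortran.py | print_function_use
-- ===== SOURCE A (Python) =====
-- def print_function_use( s, function, subset, interface=True, maxlen=0 ):
--     def module_len( derived_types, x ):
--         tmp = list()
--         for elem in sorted( derived_types[x] ):
--             if interface and (elem in ( "c_loc", "c_null_ptr", "c_f_pointer" )):
--                 continue
--             tmp.append( elem )
--
--         if len(tmp) > 0:
--             return len(x)
--         else:
--             return 0
--
--     string = ""
--     if 'derived_types' in function.keys():
--
--         derived_types = function['derived_types'][subset]
--
--         maxlen2 = max( map(lambda x: module_len( derived_types, x ), derived_types.keys()) )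
--         maxlen = max( maxlen, maxlen2 )
--
--         for module in sorted( derived_types.keys() ):
--             line = s*" " + "use :: " + module + "," + (maxlen - len(module))*" " + " only : "
--
--             j = 0
--             for elem in sorted( derived_types[module] ):
--                 if interface and (elem in ( "c_loc", "c_null_ptr", "c_f_pointer" )):
--                     continue
--                 if j > 0:
--                     line += ", "
--                 line += elem
--                 j += 1
--             line += "\n"
--
--             if j > 0:
--                 string += line
--
--     string += s*" " + "implicit none\n"
--     return string
-- ===== SOURCE B (Python) =====
-- def print_function_use( s, function, subset, interface=True, maxlen=0 ):
--     pad = " " * s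
--     body = ""
--     if 'derived_types' in function:
--         dt = function['derived_types'][subset]
--         skip = ("c_loc", "c_null_ptr", "c_f_pointer")
--         pairs = sorted((m, e) for m, elems in dt.items() for e in elems
--                        if not (interface and e in skip))
--         width = maxlen
--         for m, _ in pairs:
--             width = max(width, len(m))
--         prev = None
--         for m, e in pairs:
--             if m == prev:
--                 body += ", " + e
--             else:
--                 if prev is not None:
--                     body += "\n"
--                 body += pad + "use :: " + m + "," + " " * (width - len(m)) + " only : " + e
--                 prev = m
--         if prev is not None:
--             body += "\n"
--     return body + pad + "implicit none\n"
-- ===== Notes on version B (the rewrite author's own statement) =====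
-- stated objective: alternative
-- what changed: B flattens derived_types[subset] into one globally sorted, interface-filtered list of (module, element) pairs and emits all lines in a single group-by-consecutive pass with prev-tracking and a running max for the padding width, instead of A's nested per-module loops with a module_len helper, a max over per-module values and a j-counter for separators.
import Mathlib
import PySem

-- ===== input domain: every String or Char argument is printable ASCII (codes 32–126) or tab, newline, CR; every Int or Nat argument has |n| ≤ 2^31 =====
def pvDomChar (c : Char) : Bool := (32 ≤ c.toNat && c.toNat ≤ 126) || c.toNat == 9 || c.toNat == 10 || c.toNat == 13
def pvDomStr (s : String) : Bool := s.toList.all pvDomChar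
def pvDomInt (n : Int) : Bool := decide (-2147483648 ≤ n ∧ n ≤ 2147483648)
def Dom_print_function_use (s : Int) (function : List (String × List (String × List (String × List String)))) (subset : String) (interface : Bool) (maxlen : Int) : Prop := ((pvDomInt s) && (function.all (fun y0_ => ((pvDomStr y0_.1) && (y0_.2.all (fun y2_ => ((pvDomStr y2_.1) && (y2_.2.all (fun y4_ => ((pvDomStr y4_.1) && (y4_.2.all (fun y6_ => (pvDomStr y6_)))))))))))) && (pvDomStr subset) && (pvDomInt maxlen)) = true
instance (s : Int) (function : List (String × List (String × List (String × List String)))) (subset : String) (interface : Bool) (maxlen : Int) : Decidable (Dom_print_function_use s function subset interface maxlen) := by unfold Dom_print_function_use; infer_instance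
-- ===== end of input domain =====

-- B replaces A's nested per-module loops (per-module re-filter helper, counter-driven string building)
-- by a different algorithm: flatten derived_types[subset] into one globally sorted, filtered list of
-- (module, element) pairs, then emit all lines in a single group-by-consecutive pass with prev-tracking
-- and a running max for the padding width (objective: alternative; same asymptotic cost).

-- ===== PORT A =====
-- the tuple-membership test  interface and (elem in ("c_loc","c_null_ptr","c_f_pointer"))
def pfuExclude (interface : Bool) (elem : String) : Bool :=
  interface && (elem == "c_loc" || elem == "c_null_ptr" || elem == "c_f_pointer")

-- A's inner helper module_len; derived_types[x] is read with getD (x is always a key of dt at the call sites)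
def pfuModuleLen (interface : Bool) (dt : PySem.Dict String (List String)) (x : String) : Int :=
  let tmp := (PySem.List.sorted (dt.getD x []) (fun e => e) false).foldl
      (fun tmp elem => if pfuExclude interface elem then tmp else tmp ++ [elem]) []
  if tmp.length > 0 then PySem.Str.len x else 0

def print_function_use (s : Int) (function : List (String × List (String × List (String × List String)))) (subset : String) (interface : Bool) (maxlen : Int) : String :=
  let string : List Char := []
  let fd := PySem.Dict.ofList function
  let string :=
    if fd.contains "derived_types" then
      let dt := PySem.Dict.ofList ((PySem.Dict.ofList (fd.getD "derived_types" [])).getD subset [])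
      -- Python's max(...) over a NONEMPTY sequence (Pre_ guarantees it), ported as the reduce it is
      let maxlen2 : Int := match dt.keys.map (fun x => pfuModuleLen interface dt x) with
        | [] => 0
        | h :: t => t.foldl max h
      let maxlen := max maxlen maxlen2
      (PySem.List.sorted dt.keys (fun x => x) false).foldl (fun string module =>
        let line := PySem.List.pyRepeat [' '] s ++ "use :: ".toList ++ module.toList
            ++ [','] ++ PySem.List.pyRepeat [' '] (maxlen - PySem.Str.len module) ++ " only : ".toList
        let lj := (PySem.List.sorted (dt.getD module []) (fun e => e) false).foldl
          (fun (lj : List Char × Int) elem =>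
            if pfuExclude interface elem then lj
            else ((if lj.2 > 0 then lj.1 ++ ", ".toList else lj.1) ++ elem.toList, lj.2 + 1))
          (line, 0)
        let line := lj.1 ++ ['\n']
        if lj.2 > 0 then string ++ line else string) string
    else string
  String.mk (string ++ PySem.List.pyRepeat [' '] s ++ "implicit none\n".toList)

-- ===== PORT B =====
-- B's filter test  not (interface and e in skip)
def pfuKeep (interface : Bool) (e : String) : Bool :=
  !(interface && (e == "c_loc" || e == "c_null_ptr" || e == "c_f_pointer"))

def print_function_use_alt (s : Int) (function : List (String × List (String × List (String × List String)))) (subset : String) (interface : Bool) (maxlen : Int) : String :=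
  let pad := PySem.List.pyRepeat [' '] s
  let body : List Char := []
  let body :=
    if (PySem.Dict.ofList function).contains "derived_types" then
      let dt := PySem.Dict.ofList ((PySem.Dict.ofList ((PySem.Dict.ofList function).getD "derived_types" [])).getD subset [])
      -- sorted((m, e) for m, elems in dt.items() for e in elems if not (interface and e in skip)):
      -- tuples of strings compare lexicographically = sorted2 with the two component keys
      let pairs := PySem.List.sorted2
          (dt.items.flatMap (fun me => (me.2.filter (fun e => pfuKeep interface e)).map (fun e => (me.1, e))))
          (fun p => p.1) (fun p => p.2) false
      let width := pairs.foldl (fun w p => max w (PySem.Str.len p.1)) maxlen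
      let bp := pairs.foldl (fun (bp : List Char × Option String) p =>
          if (some p.1 : Option String) == bp.2 then (bp.1 ++ ", ".toList ++ p.2.toList, bp.2)
          else ((if bp.2.isSome then bp.1 ++ ['\n'] else bp.1)
                ++ pad ++ "use :: ".toList ++ p.1.toList ++ [',']
                ++ PySem.List.pyRepeat [' '] (width - PySem.Str.len p.1) ++ " only : ".toList ++ p.2.toList,
                some p.1))
          (body, none)
      if bp.2.isSome then bp.1 ++ ['\n'] else bp.1
    else body
  String.mk (body ++ pad ++ "implicit none\n".toList)

-- ===== PRECONDITION & SPEC =====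
-- Pre_ excludes exactly the inputs on which the Python A raises: a KeyError when function has a
-- 'derived_types' entry whose dict lacks the key `subset`, and a ValueError (max of an empty
-- sequence) when function['derived_types'][subset] is an empty dict.
def Pre_print_function_use (s : Int) (function : List (String × List (String × List (String × List String)))) (subset : String) (interface : Bool) (maxlen : Int) : Prop :=
  (PySem.Dict.ofList function).contains "derived_types" = true →
    ((PySem.Dict.ofList ((PySem.Dict.ofList function).getD "derived_types" [])).contains subset = true
     ∧ (PySem.Dict.ofList ((PySem.Dict.ofList ((PySem.Dict.ofList function).getD "derived_types" [])).getD subset [])).keys ≠ [])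
instance (s : Int) (function : List (String × List (String × List (String × List String)))) (subset : String) (interface : Bool) (maxlen : Int) : Decidable (Pre_print_function_use s function subset interface maxlen) := by unfold Pre_print_function_use; infer_instance

def pvWitness_print_function_use : Int × (List (String × List (String × List (String × List String)))) × String × Bool × Int :=
  (2, [("derived_types", [("p", [("mod_a", ["x", "c_loc"])])])], "p", true, 0)

def Spec_print_function_use (s : Int) (function : List (String × List (String × List (String × List String)))) (subset : String) (interface : Bool) (maxlen : Int) (out : String) : Prop := out = print_function_use_alt s function subset interface maxlen
instance (s : Int) (function : List (String × List (String × List (String × List String)))) (subset : String) (interface : Bool) (maxlen : Int) (out : String) : Decidable (Spec_print_function_use s function subset interface maxlen out) := by unfold Spec_print_function_use; infer_instance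

-- ===== CLAIM (what is proved, stated in full; the proofs are below) =====
def Claim_equal_print_function_use : Prop := ∀ (s : Int) (function : List (String × List (String × List (String × List String)))) (subset : String) (interface : Bool) (maxlen : Int), Dom_print_function_use s function subset interface maxlen → Pre_print_function_use s function subset interface maxlen → Spec_print_function_use s function subset interface maxlen (print_function_use s function subset interface maxlen)

-- ===== LEMMAS AND PROOFS =====

-- lexicographic ≤ on string pairs (Python tuple comparison)
def pvLE (a b : String × String) : Prop := a.1 < b.1 ∨ (a.1 = b.1 ∧ a.2 ≤ b.2)
-- the strict-before test sorted2 sorts by (reverse = False)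
def pvBefore (a b : String × String) : Bool :=
  decide (a.1 < b.1) || (!decide (b.1 < a.1) && decide (a.2 < b.2))

theorem pvBefore_eq_false_iff (a b : String × String) : pvBefore b a = false ↔ pvLE a b := by
  unfold pvBefore pvLE
  rcases lt_trichotomy a.1 b.1 with h | h | h
  · simp [h, not_lt_of_gt h, ne_of_lt h]
  · simp [h, not_lt]
  · simp [h, not_lt_of_gt h, (ne_of_lt h).symm]

theorem pvLE_trans {a b c : String × String} (h1 : pvLE a b) (h2 : pvLE b c) : pvLE a c := by
  unfold pvLE at *
  rcases h1 with h1 | ⟨h1, h1'⟩ <;> rcases h2 with h2 | ⟨h2, h2'⟩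
  · exact Or.inl (lt_trans h1 h2)
  · exact Or.inl (h2 ▸ h1)
  · exact Or.inl (h1 ▸ h2)
  · exact Or.inr ⟨h1.trans h2, le_trans h1' h2'⟩

theorem pvLE_antisymm {a b : String × String} (h1 : pvLE a b) (h2 : pvLE b a) : a = b := by
  unfold pvLE at *
  rcases h1 with h1 | ⟨h1, h1'⟩ <;> rcases h2 with h2 | ⟨h2, h2'⟩
  · exact absurd h2 (not_lt_of_gt h1)
  · exact absurd h1 (h2 ▸ lt_irrefl _)
  · exact absurd h2 (h1 ▸ lt_irrefl _)
  · exact Prod.ext h1 (le_antisymm h1' h2')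

theorem pvBefore_imp {a b : String × String} (h : pvBefore a b = true) : pvLE a b := by
  unfold pvBefore at h
  unfold pvLE
  simp only [Bool.or_eq_true, Bool.and_eq_true, Bool.not_eq_true', decide_eq_true_eq,
    decide_eq_false_iff_not] at h
  rcases h with h | ⟨h1, h2⟩
  · exact Or.inl h
  · rcases lt_or_eq_of_le (not_lt.mp h1) with h | h
    · exact Or.inl h
    · exact Or.inr ⟨h ▸ rfl, le_of_lt h2⟩

theorem pv_insertBy_pairwise (x : String × String) (l : List (String × String))
    (h : l.Pairwise pvLE) : (PySem.List.insertBy pvBefore x l).Pairwise pvLE := by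
  induction l with
  | nil => simp [PySem.List.insertBy]
  | cons y ys ih =>
      rw [List.pairwise_cons] at h
      by_cases hb : pvBefore x y = true
      · rw [show PySem.List.insertBy pvBefore x (y :: ys) = x :: y :: ys by
          simp [PySem.List.insertBy, hb]]
        refine List.Pairwise.cons ?_ (List.Pairwise.cons h.1 h.2)
        intro z hz
        rcases hz with _ | hz
        · exact pvBefore_imp hb
        · exact pvLE_trans (pvBefore_imp hb) (h.1 _ (by assumption))
      · rw [show PySem.List.insertBy pvBefore x (y :: ys) = y :: PySem.List.insertBy pvBefore x ys by
          simp [PySem.List.insertBy, hb]]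
        refine List.Pairwise.cons ?_ (ih h.2)
        intro z hz
        rcases (PySem.List.mem_insertBy pvBefore x z ys).mp hz with hzx | hz
        · exact hzx ▸ (pvBefore_eq_false_iff y x).mp (Bool.eq_false_iff.mpr hb)
        · exact h.1 _ hz

theorem pv_sorted2_unfold (xs : List (String × String)) :
    PySem.List.sorted2 xs (fun p => p.1) (fun p => p.2) false
    = xs.foldl (fun acc x => PySem.List.insertBy pvBefore x acc) [] := rfl

theorem pv_sorted2_pairwise (xs : List (String × String)) :
    (PySem.List.sorted2 xs (fun p => p.1) (fun p => p.2) false).Pairwise pvLE := by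
  rw [pv_sorted2_unfold]
  suffices h : ∀ acc, acc.Pairwise pvLE →
      (xs.foldl (fun acc x => PySem.List.insertBy pvBefore x acc) acc).Pairwise pvLE from
    h [] (by simp)
  induction xs with
  | nil => intro acc h; exact h
  | cons x xs ih => intro acc h; exact ih _ (pv_insertBy_pairwise x acc h)

-- the sort result is THE pvLE-ordered permutation
theorem pv_sorted2_eq (xs ys : List (String × String)) (hp : ys.Perm xs)
    (hw : ys.Pairwise pvLE) :
    PySem.List.sorted2 xs (fun p => p.1) (fun p => p.2) false = ys := by
  refine List.eq_of_perm_of_sorted (fun a b _ _ h1 h2 => pvLE_antisymm h1 h2)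
    (pv_sorted2_pairwise xs) hw ?_
  exact (PySem.List.sorted2_perm xs _ _ false).trans hp.symm

theorem pfu_join_cons (sep : List Char) (x : List Char) (xs : List (List Char)) :
    PySem.Chars.join sep (x :: xs) = x ++ (xs.map (fun y => sep ++ y)).flatten := by
  induction xs generalizing x with
  | nil => simp [PySem.Chars.join_singleton]
  | cons h t ih => rw [PySem.Chars.join_cons_cons, ih h]; simp


-- B's grouping step (the body of B's second fold), with pad and width fixed
def pvStep (pad : List Char) (width : Int) (bp : List Char × Option String) (p : String × String) :
    List Char × Option String :=
  if (some p.1 : Option String) == bp.2 then (bp.1 ++ ", ".toList ++ p.2.toList, bp.2)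
  else ((if bp.2.isSome then bp.1 ++ ['\n'] else bp.1)
        ++ pad ++ "use :: ".toList ++ p.1.toList ++ [',']
        ++ PySem.List.pyRepeat [' '] (width - PySem.Str.len p.1) ++ " only : ".toList ++ p.2.toList,
        some p.1)

-- one full output line (no trailing newline) for module m
def pvLine (pad : List Char) (width : Int) (g : String → List String) (m : String) : List Char :=
  pad ++ "use :: ".toList ++ m.toList ++ [',']
  ++ PySem.List.pyRepeat [' '] (width - PySem.Str.len m) ++ " only : ".toList
  ++ PySem.Chars.join ", ".toList ((g m).map String.toList)

-- reference emitter: what B's grouping pass produces per remaining key list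
def pvEmit (line : String → List Char) (g : String → List String) :
    Option String → List String → List Char × Option String
  | prev, [] => ([], prev)
  | prev, m :: K =>
      if g m = [] then pvEmit line g prev K
      else
        let r := pvEmit line g (some m) K
        ((if prev.isSome then ['\n'] else []) ++ line m ++ r.1, r.2)

theorem pv_fold_group (pad : List Char) (width : Int) (m : String) (es : List String)
    (acc : List Char) :
    (es.map (fun e => (m, e))).foldl (pvStep pad width) (acc, some m)
    = (acc ++ (es.map (fun e => ", ".toList ++ e.toList)).flatten, some m) := by
  induction es generalizing acc with
  | nil => simp
  | cons e es ih => simp [pvStep, ih]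

theorem pv_fold_emit (pad : List Char) (width : Int) (g : String → List String) :
    ∀ (K : List String) (prev : Option String) (acc : List Char),
    K.Pairwise (· < ·) → (∀ m ∈ K, prev ≠ some m) →
    (K.flatMap (fun m => (g m).map (fun e => (m, e)))).foldl (pvStep pad width) (acc, prev)
    = (acc ++ (pvEmit (pvLine pad width g) g prev K).1, (pvEmit (pvLine pad width g) g prev K).2) := by
  intro K
  induction K with
  | nil => intro prev acc _ _; simp [pvEmit]
  | cons m K ih =>
      intro prev acc hpw hprev
      rw [List.pairwise_cons] at hpw
      have hprev' : ∀ m' ∈ K, (some m : Option String) ≠ some m' := by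
        intro m' hm' h
        exact absurd (Option.some.inj h) (ne_of_lt (hpw.1 m' hm'))
      by_cases hg : g m = []
      · simp only [List.flatMap_cons, hg, List.map_nil, List.nil_append, pvEmit, if_pos]
        exact ih prev acc hpw.2 (fun m' hm' => hprev m' (List.mem_cons_of_mem m hm'))
      · obtain ⟨e, es, hes⟩ := List.exists_cons_of_ne_nil hg
        simp only [List.flatMap_cons, hes, List.map_cons, List.foldl_append, List.foldl_cons]
        have hbeq : ((some m : Option String) == prev) = false :=
          beq_eq_false_iff_ne.mpr (fun h => hprev m List.mem_cons_self h.symm)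
        rw [show pvStep pad width (acc, prev) (m, e)
            = ((if prev.isSome then acc ++ ['\n'] else acc)
               ++ pad ++ "use :: ".toList ++ m.toList ++ [',']
               ++ PySem.List.pyRepeat [' '] (width - PySem.Str.len m) ++ " only : ".toList ++ e.toList,
               some m) by simp [pvStep, hbeq]]
        rw [pv_fold_group]
        rw [ih (some m) _ hpw.2 hprev']
        have hemit : pvEmit (pvLine pad width g) g prev (m :: K)
            = ((if prev.isSome then ['\n'] else []) ++ pvLine pad width g m
               ++ (pvEmit (pvLine pad width g) g (some m) K).1,
               (pvEmit (pvLine pad width g) g (some m) K).2) := by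
          simp [pvEmit, hg]
        rw [hemit]
        refine Prod.ext ?_ rfl
        simp only [pvLine, hes, List.map_cons, pfu_join_cons, List.map_map]
        cases prev <;> simp [Function.comp_def, List.append_assoc]

-- emitting with a previous line already out: every chunk is newline-prefixed
theorem pv_emit_some (line : String → List Char) (g : String → List String) :
    ∀ (K : List String) (m0 : String),
    (pvEmit line g (some m0) K).2.isSome = true
    ∧ (pvEmit line g (some m0) K).1 ++ ['\n']
      = ['\n'] ++ K.flatMap (fun m => if g m = [] then [] else line m ++ ['\n']) := by
  intro K
  induction K with
  | nil => intro m0; simp [pvEmit]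
  | cons m K ih =>
      intro m0
      by_cases hg : g m = []
      · simpa [pvEmit, hg] using ih m0
      · simp only [pvEmit, hg, List.flatMap_cons]
        refine ⟨(ih m).1, ?_⟩
        simp [List.append_assoc, (ih m).2]

-- the whole grouping pass (started with prev = None, final newline appended iff anything was emitted)
-- produces exactly A's concatenation of per-module chunks
theorem pv_emit_none (line : String → List Char) (g : String → List String) :
    ∀ (K : List String),
    (if (pvEmit line g none K).2.isSome then (pvEmit line g none K).1 ++ ['\n']
     else (pvEmit line g none K).1)
    = K.flatMap (fun m => if g m = [] then [] else line m ++ ['\n']) := by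
  intro K
  induction K with
  | nil => simp [pvEmit]
  | cons m K ih =>
      by_cases hg : g m = []
      · simpa [pvEmit, hg] using ih
      · have h := pv_emit_some line g K m
        have hemit : pvEmit line g none (m :: K)
            = (line m ++ (pvEmit line g (some m) K).1, (pvEmit line g (some m) K).2) := by
          simp [pvEmit, hg]
        rw [List.flatMap_cons, hemit]
        simp only [h.1, if_true]
        rw [if_neg hg, List.append_assoc, h.2]
        simp

-- A's skip-or-append accumulation loop is a filter
theorem pfu_foldl_skip_append {α : Type} (p : α → Bool) (l : List α) (acc : List α) :
    l.foldl (fun acc x => if p x then acc else acc ++ [x]) acc = acc ++ l.filter (fun x => !p x) := by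
  induction l generalizing acc with
  | nil => simp
  | cons h t ih => by_cases hp : p h <;> simp [hp, ih]

-- A's conditional line-append loop is a flatMap over the filter
theorem pfu_foldl_append_if_flat {α β : Type} (p : α → Bool) (g : α → List β) (l : List α) (acc : List β) :
    l.foldl (fun acc x => if p x then acc ++ g x else acc) acc = acc ++ (l.filter p).flatMap g := by
  induction l generalizing acc with
  | nil => simp
  | cons h t ih => by_cases hp : p h <;> simp [hp, ih]

theorem pfu_filter_flatMap {α β : Type} (p : α → Bool) (q : α → List β) (l : List α) :
    (l.filter p).flatMap q = l.flatMap (fun x => if p x then q x else []) := by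
  induction l with
  | nil => rfl
  | cons h t ih => by_cases hp : p h <;> simp [hp, ih]

theorem pfu_inner_aux (i : Bool) (es : List String) (acc : List Char) (j : Int) (hj : 0 < j) :
    es.foldl (fun (lj : List Char × Int) elem =>
        if pfuExclude i elem then lj
        else ((if lj.2 > 0 then lj.1 ++ ", ".toList else lj.1) ++ elem.toList, lj.2 + 1)) (acc, j)
    = (acc ++ (((es.filter (fun e => !pfuExclude i e)).map (fun e => ", ".toList ++ e.toList)).flatten),
       j + ((es.filter (fun e => !pfuExclude i e)).length : Int)) := by
  induction es generalizing acc j with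
  | nil => simp
  | cons h t ih =>
      by_cases hp : pfuExclude i h
      · simp only [List.foldl_cons, hp, List.filter_cons, Bool.not_true, if_pos]
        rw [ih acc j hj]
        simp
      · simp only [List.foldl_cons, hp, List.filter_cons, Bool.not_false, Bool.false_eq_true,
          not_false_iff, if_neg]
        rw [if_pos hj]
        rw [ih (acc ++ ", ".toList ++ h.toList) (j+1) (by omega)]
        simp
        omega

-- A's inner line loop, characterised by filter/join
theorem pfu_inner_loop (i : Bool) (es : List String) (line0 : List Char) :
    es.foldl (fun (lj : List Char × Int) elem =>
        if pfuExclude i elem then lj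
        else ((if lj.2 > 0 then lj.1 ++ ", ".toList else lj.1) ++ elem.toList, lj.2 + 1)) (line0, 0)
    = (line0 ++ PySem.Chars.join ", ".toList ((es.filter (fun e => !pfuExclude i e)).map String.toList),
       ((es.filter (fun e => !pfuExclude i e)).length : Int)) := by
  induction es generalizing line0 with
  | nil => simp [PySem.Chars.join_nil]
  | cons h t ih =>
      by_cases hp : pfuExclude i h
      · simp only [List.foldl_cons, hp, List.filter_cons, Bool.not_true, if_pos]
        rw [ih line0]
        simp
      · simp only [List.foldl_cons, hp, List.filter_cons, Bool.not_false, Bool.false_eq_true,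
          not_false_iff, if_neg]
        rw [if_neg (by omega), show (0:Int) + 1 = 1 from rfl]
        rw [pfu_inner_aux i t (line0 ++ h.toList) 1 (by omega)]
        simp [pfu_join_cons]
        exact ⟨rfl, by omega⟩

-- membership in the flattened pair list
theorem pv_mem_T {K : List String} {g : String → List String} {m e : String} :
    (m, e) ∈ K.flatMap (fun m => (g m).map (fun e => (m, e))) ↔ m ∈ K ∧ e ∈ g m := by
  simp only [List.mem_flatMap, List.mem_map, Prod.mk.injEq]
  constructor
  · rintro ⟨m', hm', e', he', rfl, rfl⟩; exact ⟨hm', he'⟩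
  · rintro ⟨hm, he⟩; exact ⟨m, hm, e, he, rfl, rfl⟩

-- the flattened pair list is pvLE-sorted when modules are strict-sorted and groups are sorted
theorem pv_T_pairwise (K : List String) (g : String → List String)
    (hK : K.Pairwise (· < ·)) (hg : ∀ m ∈ K, (g m).Pairwise (· ≤ ·)) :
    (K.flatMap (fun m => (g m).map (fun e => (m, e)))).Pairwise pvLE := by
  rw [List.flatMap_def, List.pairwise_flatten]
  constructor
  · intro l' hl'
    obtain ⟨m, hm, rfl⟩ := List.mem_map.mp hl'
    exact List.pairwise_map.mpr ((hg m hm).imp (fun h => Or.inr ⟨rfl, h⟩))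
  · refine List.pairwise_map.mpr (hK.imp ?_)
    intro m1 m2 h12 x hx y hy
    obtain ⟨_, _, rfl⟩ := List.mem_map.mp hx
    obtain ⟨_, _, rfl⟩ := List.mem_map.mp hy
    exact Or.inl h12

-- A's width equals B's running max over the pair list, whenever some pair exists
theorem pv_width_eq (maxlen : Int) (keys : List String) (f : String → Int)
    (g : String → List String) (K : List String) (hperm : K.Perm keys)
    (hf : ∀ m, f m = if g m = [] then 0 else PySem.Str.len m)
    (hT : K.flatMap (fun m => (g m).map (fun e => (m, e))) ≠ [])
    (hkeys : keys ≠ []) :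
    max maxlen (match keys.map f with | [] => 0 | h :: t => t.foldl max h)
    = (K.flatMap (fun m => (g m).map (fun e => (m, e)))).foldl
        (fun w p => max w (PySem.Str.len p.1)) maxlen := by
  set T := K.flatMap (fun m => (g m).map (fun e => (m, e))) with hTdef
  have hlen : ∀ s : String, 0 ≤ PySem.Str.len s := by intro s; simp [PySem.Str.len_eq]
  obtain ⟨p0, hp0⟩ : ∃ p, p ∈ T := by
    cases hT' : T with
    | nil => exact absurd hT' hT
    | cons a t => exact ⟨a, List.mem_cons_self⟩
  have hB := PySem.List.le_foldl_max_int T (fun p => PySem.Str.len p.1) maxlen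
  set wB := T.foldl (fun w p => max w (PySem.Str.len p.1)) maxlen with hwB
  cases hmap : keys.map f with
  | nil => exact absurd (List.map_eq_nil_iff.mp hmap) hkeys
  | cons h t =>
      have hA := PySem.List.le_foldl_max t h
      set m2 := t.foldl max h with hm2
      -- every f-value is ≤ m2
      have hfle : ∀ m ∈ keys, f m ≤ m2 := by
        intro m hm
        have : f m ∈ h :: t := hmap ▸ List.mem_map_of_mem hm
        rcases List.mem_cons.mp this with he | hmem
        · rw [he]; exact hA.1
        · exact hA.2 _ hmem
      -- m2 is one of the f-values
      have hm2mem : ∃ m ∈ keys, m2 = f m := by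
        rcases PySem.List.foldl_max_mem t h with he | he
        · obtain ⟨m, hm, hfm⟩ := List.mem_map.mp (hmap ▸ (List.mem_cons_self : h ∈ h :: t))
          exact ⟨m, hm, (hm2.trans he).symm ▸ hfm.symm⟩
        · obtain ⟨m, hm, hfm⟩ := List.mem_map.mp (hmap ▸ (List.mem_cons_of_mem h he))
          exact ⟨m, hm, hfm.symm⟩
      apply le_antisymm
      · refine max_le hB.1 ?_
        show List.foldl max h t ≤ wB
        rw [← hm2]
        obtain ⟨m, hm, hfm⟩ := hm2mem
        rw [hfm, hf m]
        by_cases hgm : g m = []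
        · rw [if_pos hgm]
          exact le_trans (hlen p0.1) (hB.2 p0 hp0)
        · rw [if_neg hgm]
          obtain ⟨e, es, hes⟩ := List.exists_cons_of_ne_nil hgm
          have : (m, e) ∈ T := pv_mem_T.mpr ⟨hperm.mem_iff.mpr hm, hes ▸ List.mem_cons_self⟩
          exact hB.2 _ this
      · have hfold : wB = (T.map (fun p => PySem.Str.len p.1)).foldl max maxlen := by
          rw [List.foldl_map]
        rw [hfold]
        rcases PySem.List.foldl_max_mem (T.map (fun p => PySem.Str.len p.1)) maxlen with he | he
        · rw [he]; exact le_max_left _ _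
        · obtain ⟨p, hp, hlenp⟩ := List.mem_map.mp he
          obtain ⟨m, e⟩ := p
          obtain ⟨hmK, heg⟩ := pv_mem_T.mp hp
          rw [← hlenp]
          have h1 := hfle m (hperm.mem_iff.mp hmK)
          rw [hf m, if_neg (List.ne_nil_of_mem heg)] at h1
          refine le_trans h1 (le_trans ?_ (le_max_right maxlen _))
          show m2 ≤ (match h :: t with | [] => (0:Int) | h :: t => List.foldl max h t)
          rw [hm2]




theorem pvStep_def (pad : List Char) (width : Int) :
    (fun (bp : List Char × Option String) (p : String × String) =>
      if (some p.1 : Option String) == bp.2 then (bp.1 ++ ", ".toList ++ p.2.toList, bp.2)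
      else ((if bp.2.isSome then bp.1 ++ ['\n'] else bp.1)
            ++ pad ++ "use :: ".toList ++ p.1.toList ++ [',']
            ++ PySem.List.pyRepeat [' '] (width - PySem.Str.len p.1) ++ " only : ".toList ++ p.2.toList,
            some p.1))
    = pvStep pad width := rfl

theorem pv_branch (s maxlen : Int) (interface : Bool) (dt : PySem.Dict String (List String))
    (hnd : dt.keys.Nodup) (hne : dt.keys ≠ []) :
    (let maxlen2 : Int := match dt.keys.map (fun x => pfuModuleLen interface dt x) with
      | [] => 0
      | h :: t => t.foldl max h
    let maxlenA := max maxlen maxlen2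
    (PySem.List.sorted dt.keys (fun x => x) false).foldl (fun string module =>
        let line := PySem.List.pyRepeat [' '] s ++ "use :: ".toList ++ module.toList
            ++ [','] ++ PySem.List.pyRepeat [' '] (maxlenA - PySem.Str.len module) ++ " only : ".toList
        let lj := (PySem.List.sorted (dt.getD module []) (fun e => e) false).foldl
          (fun (lj : List Char × Int) elem =>
            if pfuExclude interface elem then lj
            else ((if lj.2 > 0 then lj.1 ++ ", ".toList else lj.1) ++ elem.toList, lj.2 + 1))
          (line, 0)
        let line := lj.1 ++ ['\n']
        if lj.2 > 0 then string ++ line else string) [])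
    = (let pairs := PySem.List.sorted2
          (dt.items.flatMap (fun me => (me.2.filter (fun e => pfuKeep interface e)).map (fun e => (me.1, e))))
          (fun p => p.1) (fun p => p.2) false
      let width := pairs.foldl (fun w p => max w (PySem.Str.len p.1)) maxlen
      let bp := pairs.foldl (fun (bp : List Char × Option String) p =>
          if (some p.1 : Option String) == bp.2 then (bp.1 ++ ", ".toList ++ p.2.toList, bp.2)
          else ((if bp.2.isSome then bp.1 ++ ['\n'] else bp.1)
                ++ PySem.List.pyRepeat [' '] s ++ "use :: ".toList ++ p.1.toList ++ [',']
                ++ PySem.List.pyRepeat [' '] (width - PySem.Str.len p.1) ++ " only : ".toList ++ p.2.toList,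
                some p.1))
          ([], none)
      if bp.2.isSome then bp.1 ++ ['\n'] else bp.1) := by
  dsimp only
  set g : String → List String := fun m =>
    (PySem.List.sorted (dt.getD m []) (fun e => e) false).filter (fun e => !pfuExclude interface e)
    with hgdef
  set K := PySem.List.sorted dt.keys (fun x => x) false with hKdef
  have hKperm : K.Perm dt.keys := PySem.List.sorted_perm dt.keys (fun x => x) false
  have hKnd : K.Nodup := (hKperm.nodup_iff).mpr hnd
  have hKle : K.Pairwise (· ≤ ·) := PySem.List.sorted_pairwise dt.keys (fun x => x)
  have hKlt : K.Pairwise (· < ·) := (hKle.and hKnd).imp (fun h => lt_of_le_of_ne h.1 h.2)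
  have hgsort : ∀ m ∈ K, (g m).Pairwise (· ≤ ·) := by
    intro m _
    exact (PySem.List.sorted_pairwise _ _).filter _
  have hTperm : (K.flatMap (fun m => (g m).map (fun e => (m, e)))).Perm
      (dt.items.flatMap (fun me => (me.2.filter (fun e => pfuKeep interface e)).map (fun e => (me.1, e)))) := by
    have h1 : (K.flatMap (fun m => (g m).map (fun e => (m, e)))).Perm
        (dt.keys.flatMap (fun m => (g m).map (fun e => (m, e)))) :=
      List.Perm.flatMap_right _ hKperm
    refine h1.trans ?_
    have h2 : dt.keys.flatMap (fun m => (g m).map (fun e => (m, e)))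
        = dt.items.flatMap (fun me => (g me.1).map (fun e => (me.1, e))) := by
      show (dt.items.map Prod.fst).flatMap (fun m => (g m).map (fun e => (m, e))) = _
      simp [List.flatMap_def, List.map_map, Function.comp_def]
    rw [h2]
    refine List.Perm.flatMap_left _ ?_
    intro me hme
    have hget : dt.getD me.1 [] = me.2 :=
      PySem.Dict.getD_of_mem_items dt (by rw [Prod.mk.eta]; exact hme) hnd []
    rw [hgdef]
    show List.Perm (((PySem.List.sorted (dt.getD me.1 []) (fun e => e) false).filter
        (fun e => !pfuExclude interface e)).map (fun e => (me.1, e))) _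
    rw [hget, show (fun e => !pfuExclude interface e) = (fun e => pfuKeep interface e) from rfl]
    exact ((PySem.List.sorted_perm me.2 _ false).filter _).map _
  have hTpw : (K.flatMap (fun m => (g m).map (fun e => (m, e)))).Pairwise pvLE :=
    pv_T_pairwise K g hKlt hgsort
  have hpairs : PySem.List.sorted2
      (dt.items.flatMap (fun me => (me.2.filter (fun e => pfuKeep interface e)).map (fun e => (me.1, e))))
      (fun p => p.1) (fun p => p.2) false
      = K.flatMap (fun m => (g m).map (fun e => (m, e))) :=
    pv_sorted2_eq _ _ hTperm hTpw
  rw [hpairs]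
  have hinner : ∀ (m : String) (line0 : List Char),
      (PySem.List.sorted (dt.getD m []) (fun e => e) false).foldl
        (fun (lj : List Char × Int) elem =>
          if pfuExclude interface elem then lj
          else ((if lj.2 > 0 then lj.1 ++ ", ".toList else lj.1) ++ elem.toList, lj.2 + 1)) (line0, 0)
      = (line0 ++ PySem.Chars.join ", ".toList ((g m).map String.toList), ((g m).length : Int)) :=
    fun m line0 => pfu_inner_loop interface _ line0
  simp only [hinner]
  have hcond : ∀ (xs : List String), (((xs.length : Int) > 0)) = ((!xs.isEmpty) = true) := by
    intro xs; cases xs <;> simp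
  simp only [hcond]
  simp only [pfu_foldl_append_if_flat, List.nil_append]
  rw [pfu_filter_flatMap]
  rw [pvStep_def]
  have hnone : ∀ m ∈ K, (none : Option String) ≠ some m := fun _ _ h => by cases h
  rw [pv_fold_emit _ _ g K none [] hKlt hnone]
  dsimp only
  rw [List.nil_append, pv_emit_none]
  by_cases hT : K.flatMap (fun m => (g m).map (fun e => (m, e))) = []
  · have hall : ∀ m ∈ K, g m = [] := by
      intro m hm
      have := List.flatMap_eq_nil_iff.mp hT _ hm
      exact List.map_eq_nil_iff.mp this
    rw [List.flatMap_eq_nil_iff.mpr (fun m hm => by simp [hall m hm]),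
        List.flatMap_eq_nil_iff.mpr (fun m hm => by simp [hall m hm])]
  · have hf : ∀ m, pfuModuleLen interface dt m = if g m = [] then 0 else PySem.Str.len m := by
      intro m
      show (if ((PySem.List.sorted (dt.getD m []) (fun e => e) false).foldl
          (fun tmp elem => if pfuExclude interface elem then tmp else tmp ++ [elem]) []).length > 0
          then PySem.Str.len m else 0) = _
      rw [pfu_foldl_skip_append, List.nil_append]
      show (if 0 < (g m).length then PySem.Str.len m else 0) = _
      by_cases hgm : g m = []
      · simp [hgm]
      · simp [hgm, List.length_pos_iff.mpr hgm]
    have hw : max maxlen (match dt.keys.map (fun x => pfuModuleLen interface dt x) with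
        | [] => (0 : Int) | h :: t => t.foldl max h)
        = (K.flatMap (fun m => (g m).map (fun e => (m, e)))).foldl
            (fun w p => max w (PySem.Str.len p.1)) maxlen :=
      pv_width_eq maxlen dt.keys (fun x => pfuModuleLen interface dt x) g K hKperm hf hT hne
    rw [hw]
    refine congrArg (fun f => List.flatMap f K) ?_
    funext m
    by_cases hgm : g m = []
    · simp [hgm]
    · simp [hgm, pvLine, List.append_assoc]


-- ===== VERDICT (by name: the statement is the Claim_ definition above) =====
theorem print_function_use_spec : Claim_equal_print_function_use := by
  intro s function subset interface maxlen _ hpre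
  unfold Pre_print_function_use at hpre
  unfold Spec_print_function_use print_function_use print_function_use_alt
  by_cases hc : (PySem.Dict.ofList function).contains "derived_types" = true
  · obtain ⟨hsub, hne⟩ := hpre hc
    simp only [hc, if_true]
    exact congrArg (fun b => String.mk (b ++ PySem.List.pyRepeat [' '] s ++ "implicit none\n".toList))
      (pv_branch s maxlen interface _ (PySem.Dict.nodup_keys_ofList _) hne)
  · simp only [hc, Bool.false_eq_true, if_false]
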